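-- pv_equiv track=rewrite | github.com/nga-27/SplitWiser | cmd_app/utils.py | terminal_pretty_print_spacer
-- ===== SOURCE A (Python) =====
-- def terminal_pretty_print_spacer(line_str: str, max_tabs: int = 5) -> str:
--     """ returns tabs! """
--     t_string = ""
--     line_len = len(line_str)
--     lengths = [40, 32, 24, 16, 8]
--     real_lengths = lengths[len(lengths)-max_tabs:]
--     for length in real_lengths:
--         if line_len < length:
--             t_string += "\t"
--     return t_string
-- ===== SOURCE B (Python) =====
-- def terminal_pretty_print_spacer(line_str: str, max_tabs: int = 5) -> str:
--     n = len([40, 32, 24, 16, 8][5 - max_tabs:])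
--     return "\t" * max(0, n - len(line_str) // 8)
-- ===== Notes on version B (the rewrite author's own statement) =====
-- stated objective: simpler
-- what changed: Replaced the threshold loop by a closed form: the active thresholds are exactly 8*k for k=1..n (n = the same slice's length), so B returns max(0, n - len(line_str)//8) tab characters with no loop.
import Mathlib
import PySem

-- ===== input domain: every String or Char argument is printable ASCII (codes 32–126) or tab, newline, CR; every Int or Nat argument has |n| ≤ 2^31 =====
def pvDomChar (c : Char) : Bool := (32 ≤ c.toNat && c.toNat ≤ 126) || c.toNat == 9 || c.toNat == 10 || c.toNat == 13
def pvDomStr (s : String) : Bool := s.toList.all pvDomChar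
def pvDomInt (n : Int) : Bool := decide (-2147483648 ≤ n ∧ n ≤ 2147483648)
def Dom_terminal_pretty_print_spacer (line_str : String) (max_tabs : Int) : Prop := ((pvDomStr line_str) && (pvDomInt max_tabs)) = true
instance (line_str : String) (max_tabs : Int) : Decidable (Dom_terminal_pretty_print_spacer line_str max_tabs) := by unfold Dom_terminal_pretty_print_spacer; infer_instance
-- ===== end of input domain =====

-- B replaces A's loop over the active thresholds by a closed form: the thresholds are 8*k for
-- k = 1..n (n = the slice's length), so the number of tabs is max(0, n - len(line_str)//8).

-- ===== PORT A =====
-- string concatenation t_string += "\t" is ported on List Char (exact: a Lean String is its char list)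
def terminal_pretty_print_spacer (line_str : String) (max_tabs : Int) : String :=
  let line_len : Int := PySem.Str.len line_str
  let lengths : List Int := [40, 32, 24, 16, 8]
  let real_lengths := PySem.List.slice lengths (some (PySem.List.len lengths - max_tabs)) none
  String.ofList (real_lengths.foldl (fun t_string length =>
    if line_len < length then t_string ++ ['\t'] else t_string) [])

-- ===== PORT B =====
def terminal_pretty_print_spacer_alt (line_str : String) (max_tabs : Int) : String :=
  let n : Int := PySem.List.len (PySem.List.slice ([40, 32, 24, 16, 8] : List Int) (some (5 - max_tabs)) none)
  String.ofList (PySem.List.pyRepeat ['\t'] (max 0 (n - PySem.Int.floordiv (PySem.Str.len line_str) 8)))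

-- ===== PRECONDITION & SPEC =====
def Spec_terminal_pretty_print_spacer (line_str : String) (max_tabs : Int) (out : String) : Prop := out = terminal_pretty_print_spacer_alt line_str max_tabs
instance (line_str : String) (max_tabs : Int) (out : String) : Decidable (Spec_terminal_pretty_print_spacer line_str max_tabs out) := by unfold Spec_terminal_pretty_print_spacer; infer_instance

-- ===== CLAIM (what is proved, stated in full; the proofs are below) =====
def Claim_equal_terminal_pretty_print_spacer : Prop := ∀ (line_str : String) (max_tabs : Int), Dom_terminal_pretty_print_spacer line_str max_tabs → Spec_terminal_pretty_print_spacer line_str max_tabs (terminal_pretty_print_spacer line_str max_tabs)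

-- ===== LEMMAS AND PROOFS =====
-- core fact: the fold over the d-th suffix of [40,32,24,16,8] produces exactly
-- max(0, (5-d) - m//8) tabs, for any string length m
lemma spacer_core (d m : Nat) (hd : d ≤ 5) :
    (List.drop d ([40, 32, 24, 16, 8] : List Int)).foldl (fun t l =>
      if (m : Int) < l then t ++ ['\t'] else t) []
    = PySem.List.pyRepeat ['\t'] (max 0 ((5 - (d : Int)) - PySem.Int.floordiv (m : Int) 8)) := by
  have h8 : PySem.Int.floordiv (m : Int) 8 = ((m / 8 : Nat) : Int) := by
    exact_mod_cast PySem.Int.floordiv_natCast m 8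
  rw [h8, PySem.List.pyRepeat_singleton]
  interval_cases d <;>
    (simp only [List.drop, List.foldl]
     try split_ifs) <;>
    (try simp only [List.nil_append, List.cons_append]) <;>
    (rw [List.eq_replicate_iff]
     refine ⟨?_, ?_⟩
     · simp only [List.length_cons, List.length_nil]
       omega
     · intro b hb
       fin_cases hb <;> rfl)

-- ===== VERDICT (by name: the statement is the Claim_ definition above) =====
theorem terminal_pretty_print_spacer_spec : Claim_equal_terminal_pretty_print_spacer := by
  unfold Claim_equal_terminal_pretty_print_spacer
  intro line_str max_tabs _
  unfold Spec_terminal_pretty_print_spacer terminal_pretty_print_spacer terminal_pretty_print_spacer_alt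
  simp only [PySem.List.slice_some_none, PySem.List.len_eq, PySem.Str.len_eq,
    List.length_cons, List.length_nil, List.length_drop]
  set d := PySem.List.clampIdx 5 (5 - max_tabs) with hdd
  have hd : d ≤ 5 := PySem.List.clampIdx_le 5 (5 - max_tabs)
  have hcast : ((5 - d : Nat) : Int) = 5 - (d : Int) := by omega
  rw [hcast]
  exact congrArg String.ofList (spacer_core d line_str.toList.length hd)
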